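-- pv_equiv track=rewrite | github.com/abrarimon14/My_python_programs | test5.py | cleanedup
-- ===== SOURCE A (Python) =====
-- def cleanedup(s):
--     alphabet='123456789@_abcdefghijklmnopqrstuvwxyz'
--     cleantext=''
--     for character in s.lower():
--         if character in alphabet:
--             cleantext += character
--         else:
--             cleantext +=' '
--     return cleantext
-- ===== SOURCE B (Python) =====
-- import re
--
-- _CLEAN_RE = re.compile(r'[^1-9@_a-z]')
--
-- def cleanedup(s):
--     return _CLEAN_RE.sub(' ', s.lower())
-- ===== Notes on version B (the rewrite author's own statement) =====
-- stated objective: faster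
-- what changed: Replaces the per-character Python loop with alphabet-string membership test and repeated string concatenation by a single precompiled regex substitution over the character class [^1-9@_a-z] on s.lower().
import Mathlib
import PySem

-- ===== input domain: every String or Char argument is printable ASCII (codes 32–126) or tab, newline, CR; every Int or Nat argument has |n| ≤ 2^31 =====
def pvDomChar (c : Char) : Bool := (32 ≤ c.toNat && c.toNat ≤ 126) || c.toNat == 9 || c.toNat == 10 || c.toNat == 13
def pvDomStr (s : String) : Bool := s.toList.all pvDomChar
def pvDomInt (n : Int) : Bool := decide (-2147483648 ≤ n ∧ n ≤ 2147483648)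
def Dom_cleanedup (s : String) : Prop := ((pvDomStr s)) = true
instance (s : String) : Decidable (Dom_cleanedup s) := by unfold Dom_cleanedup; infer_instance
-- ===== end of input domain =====

-- B replaces A's per-character loop, alphabet-string membership test and string concatenation
-- by a single regex substitution over the character class [^1-9@_a-z] applied to s.lower().

-- ===== PORT A =====
def cleanedupAlphabet : List Char := "123456789@_abcdefghijklmnopqrstuvwxyz".toList

def cleanedup (s : String) : String :=
  String.ofList ((PySem.Chars.lower s.toList).foldl
    (fun cleantext c =>
      if PySem.Chars.isIn [c] cleanedupAlphabet then cleantext ++ [c] else cleantext ++ [' '])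
    [])

-- ===== PORT B =====
-- the regex character class [1-9@_a-z]; re.sub replaces every char NOT in it by ' '
def cleanedupClass (c : Char) : Bool :=
  ('1' ≤ c && c ≤ '9') || c == '@' || c == '_' || ('a' ≤ c && c ≤ 'z')

def cleanedup_alt (s : String) : String :=
  String.ofList ((PySem.Chars.lower s.toList).map (fun c => if cleanedupClass c then c else ' '))

-- ===== PRECONDITION & SPEC =====
def Spec_cleanedup (s : String) (out : String) : Prop := out = cleanedup_alt s
instance (s : String) (out : String) : Decidable (Spec_cleanedup s out) := by unfold Spec_cleanedup; infer_instance

-- ===== CLAIM (what is proved, stated in full; the proofs are below) =====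
def Claim_equal_cleanedup : Prop := ∀ (s : String), Dom_cleanedup s → Spec_cleanedup s (cleanedup s)

-- ===== LEMMAS AND PROOFS =====

theorem charToNat_inj {c d : Char} (h : c.toNat = d.toNat) : c = d :=
  Char.ext (UInt32.toNat_inj.mp h)

-- the regex class, read off on character codes
theorem class_iff_toNat (c : Char) : cleanedupClass c = true ↔
    (49 ≤ c.toNat ∧ c.toNat ≤ 57) ∨ c.toNat = 64 ∨ c.toNat = 95 ∨ (97 ≤ c.toNat ∧ c.toNat ≤ 122) := by
  have h1 : ('1').val.toNat = 49 := rfl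
  have h9 : ('9').val.toNat = 57 := rfl
  have ha : ('a').val.toNat = 97 := rfl
  have hz : ('z').val.toNat = 122 := rfl
  simp only [cleanedupClass, Bool.or_eq_true, Bool.and_eq_true, beq_iff_eq, Char.le_def,
    UInt32.le_iff_toNat_le, decide_eq_true_eq, h1, h9, ha, hz, Char.toNat]
  constructor
  · rintro (((h|h)|h)|h)
    · exact Or.inl h
    · subst h; right; left; rfl
    · subst h; right; right; left; rfl
    · right; right; right; exact h
  · rintro (h|h|h|h)
    · exact Or.inl (Or.inl (Or.inl h))
    · exact Or.inl (Or.inl (Or.inr (charToNat_inj (d := '@') h)))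
    · exact Or.inl (Or.inr (charToNat_inj (d := '_') h))
    · exact Or.inr h

-- A's alphabet string, read off on character codes
theorem mem_alpha_iff (c : Char) : (c ∈ cleanedupAlphabet) ↔
    (49 ≤ c.toNat ∧ c.toNat ≤ 57) ∨ c.toNat = 64 ∨ c.toNat = 95 ∨ (97 ≤ c.toNat ∧ c.toNat ≤ 122) := by
  have hmap : cleanedupAlphabet.map Char.toNat =
      [49,50,51,52,53,54,55,56,57,64,95,97,98,99,100,101,102,103,104,105,106,107,108,109,110,
       111,112,113,114,115,116,117,118,119,120,121,122] := by decide
  have step : (c ∈ cleanedupAlphabet) ↔ c.toNat ∈ cleanedupAlphabet.map Char.toNat := by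
    constructor
    · exact List.mem_map_of_mem
    · intro h
      obtain ⟨a, ha', he⟩ := List.mem_map.mp h
      exact charToNat_inj he.symm ▸ ha'
  rw [step, hmap]
  simp only [List.mem_cons, List.not_mem_nil, or_false]
  omega

-- A's membership test agrees with B's regex class on EVERY character
theorem isIn_eq_class (c : Char) :
    PySem.Chars.isIn [c] cleanedupAlphabet = cleanedupClass c := by
  by_cases h : cleanedupClass c = true
  · rw [h, PySem.Chars.isIn_iff_infix]
    exact (List.singleton_infix_iff c cleanedupAlphabet).mpr
      ((mem_alpha_iff c).mpr ((class_iff_toNat c).mp h))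
  · rw [Bool.not_eq_true] at h
    rw [h, PySem.Chars.isIn_eq_false_iff]
    intro hinf
    exact (Bool.eq_false_iff.mp h)
      ((class_iff_toNat c).mpr ((mem_alpha_iff c).mp
        ((List.singleton_infix_iff c cleanedupAlphabet).mp hinf)))

-- ===== VERDICT (by name: the statement is the Claim_ definition above) =====
theorem cleanedup_spec : Claim_equal_cleanedup := by
  intro s _
  unfold Spec_cleanedup cleanedup cleanedup_alt
  have hbody : (fun (cleantext : List Char) (c : Char) =>
      if PySem.Chars.isIn [c] cleanedupAlphabet then cleantext ++ [c] else cleantext ++ [' '])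
      = fun cleantext c => cleantext ++ [if cleanedupClass c then c else ' '] := by
    funext acc c
    rw [isIn_eq_class c]
    by_cases h : cleanedupClass c = true <;> simp [h]
  rw [hbody, PySem.List.foldl_append_singleton_eq_map]
  rfl
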